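-- pv_equiv track=rewrite | github.com/Intelligent-CAT-Lab/CS527JBR-Team-0 | graphectory/graph_construction/buildGraph.py | _first_script_arg
-- ===== SOURCE A (Python) =====
-- def _first_script_arg(args_list):
--     for tok in args_list:
--         if not isinstance(tok, str):
--             continue
--         if tok.startswith("-"):
--             continue
--         if "/" in tok or tok.endswith(".py"):
--             return tok
--     for tok in args_list:
--         if isinstance(tok, str) and not tok.startswith("-"):
--             return tok
--     return None
-- ===== SOURCE B (Python) =====
-- def _first_script_arg(args_list):
--     fallback = None
--     for tok in args_list:
--         if not isinstance(tok, str) or tok.startswith("-"):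
--             continue
--         if "/" in tok or tok.endswith(".py"):
--             return tok
--         if fallback is None:
--             fallback = tok
--     return fallback
-- ===== Notes on version B (the rewrite author's own statement) =====
-- stated objective: simpler
-- what changed: Replaces A's two full scans with a single pass that records the first non-flag token as a fallback and returns eagerly on the first path-like token.
import Mathlib
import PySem

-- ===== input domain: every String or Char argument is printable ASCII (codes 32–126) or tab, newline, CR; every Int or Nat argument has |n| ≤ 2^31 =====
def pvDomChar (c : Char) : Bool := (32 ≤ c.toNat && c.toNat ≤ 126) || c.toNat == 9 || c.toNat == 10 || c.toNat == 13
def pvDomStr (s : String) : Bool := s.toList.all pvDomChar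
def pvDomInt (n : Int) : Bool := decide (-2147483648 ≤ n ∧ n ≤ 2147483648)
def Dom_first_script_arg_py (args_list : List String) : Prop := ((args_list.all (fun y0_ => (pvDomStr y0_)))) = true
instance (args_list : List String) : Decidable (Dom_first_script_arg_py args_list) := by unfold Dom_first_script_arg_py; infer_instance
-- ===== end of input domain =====

-- B merges A's two scans into one pass over the list with a fallback accumulator (objective: simpler).


-- ===== PORT A =====
-- first loop of A: return the first non-flag path-like token
def pvA_loop1 (xs : List String) : Option String :=
  match xs with
  | [] => none
  | tok :: rest =>
    if PySem.Str.startswith tok "-" then pvA_loop1 rest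
    else if PySem.Str.isIn "/" tok || PySem.Str.endswith tok ".py" then some tok
    else pvA_loop1 rest

-- second loop of A: return the first non-flag token
def pvA_loop2 (xs : List String) : Option String :=
  match xs with
  | [] => none
  | tok :: rest =>
    if !PySem.Str.startswith tok "-" then some tok
    else pvA_loop2 rest

def first_script_arg_py (args_list : List String) : Option String :=
  match pvA_loop1 args_list with
  | some t => some t
  | none => pvA_loop2 args_list

-- ===== PORT B =====
-- single pass with a fallback accumulator
def pvB_loop (xs : List String) (fallback : Option String) : Option String :=
  match xs with
  | [] => fallback
  | tok :: rest =>
    if PySem.Str.startswith tok "-" then pvB_loop rest fallback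
    else if PySem.Str.isIn "/" tok || PySem.Str.endswith tok ".py" then some tok
    else pvB_loop rest (match fallback with | none => some tok | some f => some f)

def first_script_arg_py_alt (args_list : List String) : Option String :=
  pvB_loop args_list none

-- ===== PRECONDITION & SPEC =====
def Spec_first_script_arg_py (args_list : List String) (out : Option String) : Prop := out = first_script_arg_py_alt args_list
instance (args_list : List String) (out : Option String) : Decidable (Spec_first_script_arg_py args_list out) := by unfold Spec_first_script_arg_py; infer_instance

-- ===== CLAIM (what is proved, stated in full; the proofs are below) =====
def Claim_equal_first_script_arg_py : Prop := ∀ (args_list : List String), Dom_first_script_arg_py args_list → Spec_first_script_arg_py args_list (first_script_arg_py args_list)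

-- ===== LEMMAS AND PROOFS =====
-- Invariant: the one-pass loop with fallback fb equals loop1, else fb, else loop2.
theorem pvB_loop_eq (xs : List String) (fb : Option String) :
    pvB_loop xs fb =
      match pvA_loop1 xs with
      | some t => some t
      | none => match fb with
                | some f => some f
                | none => pvA_loop2 xs := by
  induction xs generalizing fb with
  | nil => cases fb <;> rfl
  | cons tok rest ih =>
    simp only [pvB_loop, pvA_loop1, pvA_loop2]
    by_cases h1 : PySem.Str.startswith tok "-" = true
    · simp only [h1, Bool.not_true, if_true, ih, Bool.false_eq_true, if_false]
    · by_cases h2 : (PySem.Str.isIn "/" tok || PySem.Str.endswith tok ".py") = true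
      · simp only [h1, h2, if_true, ih]
        simp
      · simp only [h1, h2, ih]
        cases pvA_loop1 rest <;> cases fb <;> simp

-- ===== VERDICT (by name: the statement is the Claim_ definition above) =====
theorem first_script_arg_py_spec : Claim_equal_first_script_arg_py := by
  intro args_list _
  unfold Spec_first_script_arg_py first_script_arg_py first_script_arg_py_alt
  rw [pvB_loop_eq]
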